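-- pv_equiv track=rewrite | github.com/malcolmsailor/voice_leader | voice_leader/voice_leader.py | _remap_from_omitted_indices
-- ===== SOURCE A (Python) =====
-- import typing as t
--
-- def _remap_from_omitted_indices(
--     mapping: t.Mapping[int, t.Any], omitted_indices: t.Sequence[int]
-- ):
--     """Used by shrinking_cardinality_handler()
--
--     >>> _remap_from_omitted_indices({0: "a", 1: "b", 2: "c"}, [1])
--     {0: 'a', 1: 'c'}
--
--     >>> _remap_from_omitted_indices({0: "a", 2: "c"}, [1])
--     {0: 'a', 1: 'c'}
--
--     >>> _remap_from_omitted_indices({0: "a", 1: "b", 2: "c"}, [3])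
--     {0: 'a', 1: 'b', 2: 'c'}
--
--     >>> _remap_from_omitted_indices({}, [1, 2])
--     {}
--     """
--     # This function feels inelegant...
--     if not mapping:
--         return {}
--     out = {}
--     j = 0
--     for i in range(max(mapping) + 1):
--         if i in mapping:
--             out[j] = mapping[i]
--         if i in omitted_indices:
--             j -= 1
--         j += 1
--     return out
-- ===== SOURCE B (Python) =====
-- def _remap_from_omitted_indices(mapping, omitted_indices):
--     # sort-and-merge: sorted distinct non-negative omitted indices + a pointer,
--     # instead of scanning range(max(mapping)+1) with a membership test per step
--     oms = sorted({o for o in omitted_indices if o >= 0})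
--     out = {}
--     p = 0  # number of omitted indices strictly below the current key
--     for k in sorted(mapping):
--         if k < 0:
--             continue
--         while p < len(oms) and oms[p] < k:
--             p += 1
--         out[k - p] = mapping[k]
--     return out
-- ===== Notes on version B (the rewrite author's own statement) =====
-- stated objective: faster
-- what changed: Replaces the scan over range(max(mapping)+1) with per-step membership tests in omitted_indices by sorting the keys and the distinct non-negative omitted indices once and merging them with a single pointer that counts omitted indices below each key.
import Mathlib
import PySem

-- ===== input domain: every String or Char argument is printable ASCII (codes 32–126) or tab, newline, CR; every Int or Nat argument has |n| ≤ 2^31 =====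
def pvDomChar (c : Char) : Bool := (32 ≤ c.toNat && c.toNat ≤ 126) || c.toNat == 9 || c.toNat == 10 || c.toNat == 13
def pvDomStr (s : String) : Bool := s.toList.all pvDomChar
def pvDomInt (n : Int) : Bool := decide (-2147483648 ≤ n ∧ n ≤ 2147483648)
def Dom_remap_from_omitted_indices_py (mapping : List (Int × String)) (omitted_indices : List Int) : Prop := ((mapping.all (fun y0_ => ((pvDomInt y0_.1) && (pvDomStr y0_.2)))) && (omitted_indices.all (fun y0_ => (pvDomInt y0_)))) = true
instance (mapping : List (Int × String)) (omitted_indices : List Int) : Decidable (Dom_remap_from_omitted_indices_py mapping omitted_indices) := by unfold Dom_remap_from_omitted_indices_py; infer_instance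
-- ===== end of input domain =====

-- B replaces A's scan over range(max(mapping)+1) (with a membership test in omitted_indices at
-- every step) by sorting the keys and the distinct non-negative omitted indices once and merging
-- them with a single pointer; objective: faster.

-- Python's mapping[i] (both programs only index with keys known to be present)
def pvGetMap (mapping : List (Int × String)) (i : Int) : String :=
  ((PySem.Dict.mk mapping).get? i).getD ""

-- ===== PORT A =====
def remap_from_omitted_indices_py (mapping : List (Int × String)) (omitted_indices : List Int) : List (Int × String) :=
  match mapping with
  | [] => []                                           -- if not mapping: return {}
  | (k0, _) :: rest =>
    -- max(mapping) = maximum of the keys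
    let m : Int := (rest.map Prod.fst).foldl max k0
    let keys := mapping.map Prod.fst
    let st := (PySem.List.pyRange 0 (m + 1) 1).foldl
      (fun (st : PySem.Dict Int String × Int) i =>
        let out := if keys.contains i then st.1.insert st.2 (pvGetMap mapping i) else st.1
        let j := if omitted_indices.contains i then st.2 - 1 else st.2
        (out, j + 1))
      (PySem.Dict.empty, 0)
    st.1.items

-- ===== PORT B =====
-- while p < len(oms) and oms[p] < k: p += 1
def pvAdvance (oms : List Int) (k : Int) (p : Nat) : Nat :=
  if h : p < oms.length then
    if oms[p] < k then pvAdvance oms k (p + 1) else p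
  else p
termination_by oms.length - p

def remap_from_omitted_indices_py_alt (mapping : List (Int × String)) (omitted_indices : List Int) : List (Int × String) :=
  -- oms = sorted({o for o in omitted_indices if o >= 0})
  let oms := PySem.List.sorted (PySem.Set.ofList (omitted_indices.filter (fun o => decide (0 ≤ o)))) (fun x => x) false
  -- for k in sorted(mapping): …   (a dict's keys; duplicate keys cannot occur — see Pre_)
  let st := (PySem.List.sorted (mapping.map Prod.fst) (fun x => x) false).foldl
    (fun (st : PySem.Dict Int String × Nat) k =>
      if k < 0 then st
      else
        let p := pvAdvance oms k st.2
        (st.1.insert (k - (p : Int)) (pvGetMap mapping k), p))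
    (PySem.Dict.empty, 0)
  st.1.items

-- ===== PRECONDITION & SPEC =====
-- Pre_ excludes only association lists with a duplicated key, which do not encode any Python dict
-- (A's `mapping` parameter is a Mapping); it excludes no input the Python function accepts.
def Pre_remap_from_omitted_indices_py (mapping : List (Int × String)) (omitted_indices : List Int) : Prop :=
  (mapping.map Prod.fst).Nodup
instance (mapping : List (Int × String)) (omitted_indices : List Int) : Decidable (Pre_remap_from_omitted_indices_py mapping omitted_indices) := by unfold Pre_remap_from_omitted_indices_py; infer_instance
def pvWitness_remap_from_omitted_indices_py : (List (Int × String)) × List Int := ([(0, "a"), (2, "c")], [1])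

def Spec_remap_from_omitted_indices_py (mapping : List (Int × String)) (omitted_indices : List Int) (out : List (Int × String)) : Prop := out = remap_from_omitted_indices_py_alt mapping omitted_indices
instance (mapping : List (Int × String)) (omitted_indices : List Int) (out : List (Int × String)) : Decidable (Spec_remap_from_omitted_indices_py mapping omitted_indices out) := by unfold Spec_remap_from_omitted_indices_py; infer_instance

-- ===== CLAIM (what is proved, stated in full; the proofs are below) =====
def Claim_equal_remap_from_omitted_indices_py : Prop := ∀ (mapping : List (Int × String)) (omitted_indices : List Int), Dom_remap_from_omitted_indices_py mapping omitted_indices → Pre_remap_from_omitted_indices_py mapping omitted_indices → Spec_remap_from_omitted_indices_py mapping omitted_indices (remap_from_omitted_indices_py mapping omitted_indices)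

-- ===== LEMMAS AND PROOFS =====

-- number of (distinct) omitted indices in [0, i), as A's loop counts them
def pvC (om : List Int) (i : Int) : Int :=
  (((PySem.List.pyRange 0 i 1).filter (fun x => om.contains x)).length : Int)

lemma pvC_zero (om : List Int) : pvC om 0 = 0 := by
  simp [pvC]

lemma pvC_succ (om : List Int) (a : Int) (ha : 0 ≤ a) :
    pvC om (a + 1) = pvC om a + (if om.contains a then 1 else 0) := by
  rw [pvC, PySem.List.pyRange_one_succ_right ha, List.filter_append]
  by_cases h : a ∈ om <;> simp [pvC, h]


-- the sorted distinct non-negative omitted indices, as B builds them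
def pvOms (om : List Int) : List Int :=
  PySem.List.sorted (PySem.Set.ofList (om.filter (fun o => decide (0 ≤ o)))) (fun x => x) false

-- length of the prefix of oms below k
def pvTk (oms : List Int) (k : Int) : List Int := oms.takeWhile (fun v => decide (v < k))

lemma pvOms_pairwise_lt (om : List Int) : (pvOms om).Pairwise (· < ·) :=
  PySem.List.sorted_ofList_pairwise_lt _

lemma pvOms_mem (om : List Int) (x : Int) : x ∈ pvOms om ↔ x ∈ om ∧ 0 ≤ x := by
  simp [pvOms, PySem.List.mem_sorted, PySem.Set.mem_ofList, List.mem_filter]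

lemma pvOms_nodup (om : List Int) : (pvOms om).Nodup :=
  ((pvOms_pairwise_lt om).imp fun h => ne_of_lt h)

lemma takeWhile_eq_filter_of_pairwise (l : List Int) (hp : l.Pairwise (· ≤ ·)) (k : Int) :
    l.takeWhile (fun v => decide (v < k)) = l.filter (fun v => decide (v < k)) := by
  induction l with
  | nil => rfl
  | cons a t ih =>
    rcases List.pairwise_cons.mp hp with ⟨hall, ht⟩
    by_cases hak : a < k
    · simp [hak, ih ht]
    · simp only [List.takeWhile_cons, List.filter_cons, hak, decide_false]
      have : t.filter (fun v => decide (v < k)) = [] := by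
        rw [List.filter_eq_nil_iff]
        intro x hx
        have := hall x hx
        simp only [decide_eq_true_eq]
        omega
      simp [this]

lemma pvTk_len_eq_pvC (om : List Int) (k : Int) (hk : 0 ≤ k) :
    ((pvTk (pvOms om) k).length : Int) = pvC om k := by
  unfold pvTk pvC
  rw [takeWhile_eq_filter_of_pairwise _ ((pvOms_pairwise_lt om).imp fun h => le_of_lt h)]
  have hperm : ((pvOms om).filter (fun v => decide (v < k))).Perm
      ((PySem.List.pyRange 0 k 1).filter (fun x => om.contains x)) := by
    rw [List.perm_ext_iff_of_nodup ((pvOms_nodup om).filter _)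
      ((PySem.List.nodup_pyRange_one 0 k).filter _)]
    intro x
    simp only [List.mem_filter, pvOms_mem, PySem.List.mem_pyRange_one, decide_eq_true_eq,
      List.contains_eq_mem]
    tauto
  rw [hperm.length_eq]

lemma pvAdvance_eq (oms : List Int) (k : Int) (p : Nat) :
    pvAdvance oms k p = p + ((oms.drop p).takeWhile (fun v => decide (v < k))).length := by
  fun_induction pvAdvance oms k p with
  | case1 p h hlt ih =>
    rw [List.drop_eq_getElem_cons h] at *
    simp only [List.takeWhile_cons, hlt, decide_true, if_true, List.length_cons] at *
    omega
  | case2 p h hlt =>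
    rw [List.drop_eq_getElem_cons h]
    simp [hlt]
  | case3 p h =>
    rw [List.drop_eq_nil_iff.mpr (by omega)]
    simp

lemma pvTk_ext (oms : List Int) (k0 k : Int) (h : k0 ≤ k) :
    (pvTk oms k0).length + ((oms.drop (pvTk oms k0).length).takeWhile (fun v => decide (v < k))).length
      = (pvTk oms k).length := by
  unfold pvTk
  set T := oms.takeWhile (fun v => decide (v < k0)) with hT
  have hpre : T = oms.take T.length := by
    have := List.takeWhile_prefix (l := oms) (fun v => decide (v < k0))
    rw [← hT] at this
    exact List.prefix_iff_eq_take.mp this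
  conv_rhs => rw [← List.take_append_drop T.length oms, ← hpre]
  rw [List.takeWhile_append]
  have hself : T.takeWhile (fun v => decide (v < k)) = T := by
    rw [List.takeWhile_eq_self_iff]
    intro x hx
    have := List.mem_takeWhile_imp (hT ▸ hx)
    simp only [decide_eq_true_eq] at *
    omega
  rw [if_pos (by rw [hself]), List.length_append]

lemma loopA (om keys : List Int) (g : Int → String) :
    ∀ (n : Nat) (a : Int), 0 ≤ a → ∀ (d : PySem.Dict Int String),
    (PySem.List.pyRange a (a + n) 1).foldl
      (fun (st : PySem.Dict Int String × Int) i =>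
        let out := if keys.contains i then st.1.insert st.2 (g i) else st.1
        let j := if om.contains i then st.2 - 1 else st.2
        (out, j + 1)) (d, a - pvC om a)
    = (((PySem.List.pyRange a (a + n) 1).filter (fun i => keys.contains i)).foldl
        (fun d' i => d'.insert (i - pvC om i) (g i)) d,
       (a + n) - pvC om (a + n)) := by
  intro n
  induction n with
  | zero =>
    intro a _ d
    simp [PySem.List.pyRange_one_eq_nil (le_refl a)]
  | succ n ih =>
    intro a ha d
    have hlt : a < a + ((n : Nat) + 1 : Nat) := by push_cast; omega
    rw [PySem.List.pyRange_one_cons hlt, List.foldl_cons, List.filter_cons]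
    have hstep : ((if om.contains a then a - pvC om a - 1 else a - pvC om a) + 1)
        = (a + 1) - pvC om (a + 1) := by
      rw [pvC_succ om a ha]
      by_cases h : a ∈ om <;> simp [h] <;> ring
    have harith : a + ((n : Nat) + 1 : Nat) = (a + 1) + (n : Nat) := by push_cast; ring
    by_cases hk : keys.contains a
    · simp only [hk, if_true]
      rw [harith]
      have := ih (a + 1) (by omega) (d.insert (a - pvC om a) (g a))
      simp only [List.foldl_cons]
      rw [hstep]
      exact this
    · simp only [if_neg hk]
      rw [harith]
      have := ih (a + 1) (by omega) d
      rw [hstep]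
      exact this

lemma loopB (om : List Int) (g : Int → String) :
    ∀ (l : List Int) (d : PySem.Dict Int String) (k0 : Int),
    l.Pairwise (· ≤ ·) → (∀ x ∈ l, 0 ≤ x → k0 ≤ x) →
    (l.foldl
      (fun (st : PySem.Dict Int String × Nat) k =>
        if k < 0 then st
        else
          let p := pvAdvance (pvOms om) k st.2
          (st.1.insert (k - (p : Int)) (g k), p)) (d, (pvTk (pvOms om) k0).length)).1
    = (l.filter (fun k => decide (0 ≤ k))).foldl
        (fun d' k => d'.insert (k - pvC om k) (g k)) d := by
  intro l
  induction l with
  | nil => intro d k0 _ _; rfl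
  | cons k t ih =>
    intro d k0 hp hmin
    rcases List.pairwise_cons.mp hp with ⟨hall, ht⟩
    rw [List.foldl_cons, List.filter_cons]
    by_cases hk : k < 0
    · simp only [if_pos hk, if_neg (show ¬(decide (0 ≤ k) = true) by simp only [decide_eq_true_eq]; omega)]
      exact ih d k0 ht (fun x hx h0 => hmin x (List.mem_cons_of_mem _ hx) h0)
    · have h0k : 0 ≤ k := by omega
      have hk0k : k0 ≤ k := hmin k List.mem_cons_self h0k
      have hadv : pvAdvance (pvOms om) k (pvTk (pvOms om) k0).length = (pvTk (pvOms om) k).length := by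
        rw [pvAdvance_eq]
        exact pvTk_ext (pvOms om) k0 k hk0k
      simp only [if_neg hk, if_pos (show decide (0 ≤ k) = true by simp only [decide_eq_true_eq]; omega),
        hadv, pvTk_len_eq_pvC om k h0k, List.foldl_cons]
      exact ih _ k ht (fun x hx _ => hall x hx)


lemma LA_eq_LB (keys : List Int) (m : Int) (hnd : keys.Nodup) (hmax : ∀ x ∈ keys, x ≤ m) :
    (PySem.List.pyRange 0 (m + 1) 1).filter (fun i => keys.contains i)
      = (PySem.List.sorted keys (fun x => x) false).filter (fun k => decide (0 ≤ k)) := by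
  have hLB_lt : ((PySem.List.sorted keys (fun x => x) false).filter (fun k => decide (0 ≤ k))).Pairwise (· < ·) := by
    refine List.Pairwise.filter _ ?_
    have hle := PySem.List.sorted_pairwise keys (fun x => x)
    have hnd' : (PySem.List.sorted keys (fun x => x) false).Nodup :=
      (PySem.List.sorted_perm keys (fun x => x) false).nodup_iff.mpr hnd
    exact hle.imp₂ (fun a b hab hne => lt_of_le_of_ne hab hne) hnd'
  have hLA_lt : ((PySem.List.pyRange 0 (m + 1) 1).filter (fun i => keys.contains i)).Pairwise (· < ·) :=
    List.Pairwise.filter _ (PySem.List.pairwise_lt_pyRange_one 0 (m + 1))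
  have hperm : ((PySem.List.pyRange 0 (m + 1) 1).filter (fun i => keys.contains i)).Perm
      ((PySem.List.sorted keys (fun x => x) false).filter (fun k => decide (0 ≤ k))) := by
    rw [List.perm_ext_iff_of_nodup (hLA_lt.imp fun h => ne_of_lt h) (hLB_lt.imp fun h => ne_of_lt h)]
    intro x
    simp only [List.mem_filter, PySem.List.mem_pyRange_one, PySem.List.mem_sorted,
      List.contains_eq_mem, decide_eq_true_eq]
    constructor
    · rintro ⟨⟨h0, _⟩, hmem⟩; exact ⟨hmem, h0⟩
    · rintro ⟨hmem, h0⟩; exact ⟨⟨h0, by have := hmax x hmem; omega⟩, hmem⟩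
  exact List.Perm.eq_of_pairwise
    (fun a b _ _ h1 h2 => absurd h2 (asymm h1))
    hLA_lt hLB_lt hperm

-- ===== VERDICT (by name: the statement is the Claim_ definition above) =====
theorem remap_from_omitted_indices_py_spec : Claim_equal_remap_from_omitted_indices_py := by
  intro mapping om _hdom hpre
  unfold Spec_remap_from_omitted_indices_py
  cases mapping with
  | nil => rfl
  | cons hd rest =>
    obtain ⟨k0, v0⟩ := hd
    have hkeys : ((k0, v0) :: rest : List (Int × String)).map Prod.fst = k0 :: rest.map Prod.fst := rfl
    have hnd : (((k0, v0) :: rest : List (Int × String)).map Prod.fst).Nodup := hpre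
    have hmax : ∀ x ∈ ((k0, v0) :: rest : List (Int × String)).map Prod.fst,
        x ≤ (rest.map Prod.fst).foldl max k0 := by
      intro x hx
      rw [hkeys] at hx
      rcases List.mem_cons.mp hx with rfl | hx
      · exact (PySem.List.le_foldl_max (rest.map Prod.fst) x).1
      · exact (PySem.List.le_foldl_max (rest.map Prod.fst) k0).2 x hx
    have hA : remap_from_omitted_indices_py ((k0, v0) :: rest) om
        = (((PySem.List.pyRange 0 ((rest.map Prod.fst).foldl max k0 + 1) 1).filter
              (fun i => (((k0, v0) :: rest : List (Int × String)).map Prod.fst).contains i)).foldl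
            (fun d' i => d'.insert (i - pvC om i) (pvGetMap ((k0, v0) :: rest) i))
            PySem.Dict.empty).items := by
      simp only [remap_from_omitted_indices_py]
      by_cases hneg : (rest.map Prod.fst).foldl max k0 + 1 ≤ 0
      · rw [PySem.List.pyRange_one_eq_nil hneg]; rfl
      · have h0 : (rest.map Prod.fst).foldl max k0 + 1
            = (0 : Int) + ((((rest.map Prod.fst).foldl max k0 + 1).toNat : Nat) : Int) := by omega
        rw [h0]
        have := loopA om (((k0, v0) :: rest : List (Int × String)).map Prod.fst)
          (pvGetMap ((k0, v0) :: rest)) ((rest.map Prod.fst).foldl max k0 + 1).toNat 0 le_rfl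
          PySem.Dict.empty
        rw [pvC_zero, sub_zero] at this
        rw [this]
    have hB : remap_from_omitted_indices_py_alt ((k0, v0) :: rest) om
        = (((PySem.List.sorted (((k0, v0) :: rest : List (Int × String)).map Prod.fst)
              (fun x => x) false).filter (fun k => decide (0 ≤ k))).foldl
            (fun d' k => d'.insert (k - pvC om k) (pvGetMap ((k0, v0) :: rest) k))
            PySem.Dict.empty).items := by
      simp only [remap_from_omitted_indices_py_alt]
      have hTk0 : pvTk (pvOms om) 0 = [] := by
        unfold pvTk
        rw [takeWhile_eq_filter_of_pairwise _ ((pvOms_pairwise_lt om).imp fun h => le_of_lt h)]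
        rw [List.filter_eq_nil_iff]
        intro x hx
        have := (pvOms_mem om x).1 hx
        simp only [decide_eq_true_eq]
        omega
      have hinit : (PySem.Dict.empty (κ := Int) (ν := String), (0 : Nat))
          = (PySem.Dict.empty, (pvTk (pvOms om) 0).length) := by rw [hTk0]; rfl
      rw [hinit]
      have := loopB om (pvGetMap ((k0, v0) :: rest))
        (PySem.List.sorted (((k0, v0) :: rest : List (Int × String)).map Prod.fst) (fun x => x) false)
        PySem.Dict.empty 0
        (PySem.List.sorted_pairwise _ (fun x => x))
        (fun x _ h0x => h0x)
      exact congrArg PySem.Dict.items this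
    rw [hA, hB, LA_eq_LB (((k0, v0) :: rest : List (Int × String)).map Prod.fst)
      ((rest.map Prod.fst).foldl max k0) hnd hmax]
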